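-- pv_equiv track=rewrite | github.com/avast/genrex | genrex/types.py | define_type
-- ===== SOURCE A (Python) =====
-- import string
-- from enum import IntFlag
--
-- hex_lowercase: list[str] = [
--     "0",
--     "1",
--     "2",
--     "3",
--     "4",
--     "5",
--     "6",
--     "7",
--     "8",
--     "9",
--     "a",
--     "b",
--     "c",
--     "d",
--     "e",
--     "f",
-- ]
--
-- hex_uppercase: list[str] = [
--     "0",
--     "1",
--     "2",
--     "3",
--     "4",
--     "5",
--     "6",
--     "7",
--     "8",
--     "9",
--     "A",
--     "B",
--     "C",
--     "D",
--     "E",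
--     "F",
-- ]
--
-- class ClassType(IntFlag):
--     SPACE = 1
--     NUMBERS = 2
--     HEX_LOWER = 4
--     HEX_UPPER = 8
--     HEX = 16
--     ALPHA_LOWER = 32
--     ALPHA_UPPER = 64
--     ALPHA = 128
--     ALPHA_NUM_LOWER = 256
--     ALPHA_NUM_UPPER = 512
--     ALPHA_NUM = 1024
--     WORD = 2048
--     GENERAL = 4096
--
-- def define_type(repr_string: str) -> ClassType | None:  # noqa: C901
--     if len(repr_string) == 0:
--         return None
--     elif repr_string.isspace():
--         return ClassType.SPACE
--     elif repr_string.isdecimal():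
--         return ClassType.NUMBERS
--     elif all(c in hex_lowercase for c in repr_string):
--         return ClassType.HEX_LOWER
--     elif all(c in hex_uppercase for c in repr_string):
--         return ClassType.HEX_UPPER
--     elif all(c in string.hexdigits for c in repr_string):
--         return ClassType.HEX
--     elif all(c in string.ascii_lowercase for c in repr_string):
--         return ClassType.ALPHA_LOWER
--     elif all(c in string.ascii_uppercase for c in repr_string):
--         return ClassType.ALPHA_UPPER
--     elif all(c in string.ascii_letters for c in repr_string):
--         return ClassType.ALPHA
--     elif all(c in string.ascii_lowercase + string.digits for c in repr_string):
--         return ClassType.ALPHA_NUM_LOWER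
--     elif all(c in string.ascii_uppercase + string.digits for c in repr_string):
--         return ClassType.ALPHA_NUM_UPPER
--     elif all(c in string.ascii_letters + string.digits for c in repr_string):
--         return ClassType.ALPHA_NUM
--     elif all(c in string.ascii_letters + string.digits + "_" for c in repr_string):
--         return ClassType.WORD
--     return ClassType.GENERAL
-- ===== SOURCE B (Python) =====
-- from enum import IntFlag
--
--
-- class ClassType(IntFlag):
--     SPACE = 1
--     NUMBERS = 2
--     HEX_LOWER = 4
--     HEX_UPPER = 8
--     HEX = 16
--     ALPHA_LOWER = 32
--     ALPHA_UPPER = 64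
--     ALPHA = 128
--     ALPHA_NUM_LOWER = 256
--     ALPHA_NUM_UPPER = 512
--     ALPHA_NUM = 1024
--     WORD = 2048
--     GENERAL = 4096
--
--
-- # bit per character category
-- _DIGIT, _HEXLO, _HEXUP, _LOWER, _UPPER, _UNDER, _WS, _OTHER = 1, 2, 4, 8, 16, 32, 64, 128
--
-- # (allowed category mask, resulting class) in the original priority order
-- _RULES = (
--     (_WS, ClassType.SPACE),
--     (_DIGIT, ClassType.NUMBERS),
--     (_DIGIT | _HEXLO, ClassType.HEX_LOWER),
--     (_DIGIT | _HEXUP, ClassType.HEX_UPPER),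
--     (_DIGIT | _HEXLO | _HEXUP, ClassType.HEX),
--     (_HEXLO | _LOWER, ClassType.ALPHA_LOWER),
--     (_HEXUP | _UPPER, ClassType.ALPHA_UPPER),
--     (_HEXLO | _HEXUP | _LOWER | _UPPER, ClassType.ALPHA),
--     (_DIGIT | _HEXLO | _LOWER, ClassType.ALPHA_NUM_LOWER),
--     (_DIGIT | _HEXUP | _UPPER, ClassType.ALPHA_NUM_UPPER),
--     (_DIGIT | _HEXLO | _HEXUP | _LOWER | _UPPER, ClassType.ALPHA_NUM),
--     (_DIGIT | _HEXLO | _HEXUP | _LOWER | _UPPER | _UNDER, ClassType.WORD),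
-- )
--
--
-- def _category(c: str) -> int:
--     if "0" <= c <= "9":
--         return _DIGIT
--     elif "a" <= c <= "f":
--         return _HEXLO
--     elif "A" <= c <= "F":
--         return _HEXUP
--     elif "g" <= c <= "z":
--         return _LOWER
--     elif "G" <= c <= "Z":
--         return _UPPER
--     elif c == "_":
--         return _UNDER
--     elif c.isspace():
--         return _WS
--     return _OTHER
--
--
-- def define_type(repr_string: str) -> ClassType | None:
--     if not repr_string:
--         return None
--     mask = 0
--     for c in repr_string:
--         mask |= _category(c)
--     for allowed, cls in _RULES:
--         if mask | allowed == allowed: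
--             return cls
--     return ClassType.GENERAL
-- ===== Notes on version B (the rewrite author's own statement) =====
-- stated objective: alternative
-- what changed: Replaces A's cascade of up to 12 whole-string membership scans (each 'all(c in <charset>)') by a single pass that folds every character into an 8-category bitmask, after which each class is picked by an O(1) mask-subset test in the original priority order.
import Mathlib
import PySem

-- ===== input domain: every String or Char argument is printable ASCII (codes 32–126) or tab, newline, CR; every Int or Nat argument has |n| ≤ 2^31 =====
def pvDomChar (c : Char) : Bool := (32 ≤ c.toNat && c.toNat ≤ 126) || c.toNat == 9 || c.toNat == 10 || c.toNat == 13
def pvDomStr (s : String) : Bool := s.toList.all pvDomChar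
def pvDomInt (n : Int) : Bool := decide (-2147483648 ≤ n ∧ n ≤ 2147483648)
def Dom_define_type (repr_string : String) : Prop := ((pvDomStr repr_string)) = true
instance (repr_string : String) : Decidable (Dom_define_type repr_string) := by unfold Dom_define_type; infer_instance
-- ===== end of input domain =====

-- B replaces A's cascade of up to 12 whole-string membership scans by a single pass that folds
-- every character into a bitmask of 8 character categories, then picks the class by O(1)
-- mask-subset tests in the original priority order (ClassType values encoded as Int).

-- ===== PORT A =====
def hexLowercase : List Char := ['0', '1', '2', '3', '4', '5', '6', '7', '8', '9', 'a', 'b', 'c', 'd', 'e', 'f']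

def hexUppercase : List Char := ['0', '1', '2', '3', '4', '5', '6', '7', '8', '9', 'A', 'B', 'C', 'D', 'E', 'F']

def asciiLowercase : List Char :=
  ['a', 'b', 'c', 'd', 'e', 'f', 'g', 'h', 'i', 'j', 'k', 'l', 'm', 'n', 'o', 'p', 'q', 'r', 's', 't', 'u', 'v', 'w', 'x', 'y', 'z']

def asciiUppercase : List Char :=
  ['A', 'B', 'C', 'D', 'E', 'F', 'G', 'H', 'I', 'J', 'K', 'L', 'M', 'N', 'O', 'P', 'Q', 'R', 'S', 'T', 'U', 'V', 'W', 'X', 'Y', 'Z']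

def stringDigits : List Char := ['0', '1', '2', '3', '4', '5', '6', '7', '8', '9']

-- string.hexdigits = digits + lowercase hex letters + uppercase hex letters
def stringHexdigits : List Char :=
  stringDigits ++ ['a', 'b', 'c', 'd', 'e', 'f'] ++ ['A', 'B', 'C', 'D', 'E', 'F']

-- `repr_string.isdecimal()` is ported as PySem.Str.strIsdigit (identical on the printable-ASCII domain)
def define_type (repr_string : String) : Option Int :=
  if PySem.Str.len repr_string == 0 then none
  else if PySem.Str.strIsspace repr_string then some 1
  else if PySem.Str.strIsdigit repr_string then some 2
  else if repr_string.toList.all (fun c => hexLowercase.contains c) then some 4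
  else if repr_string.toList.all (fun c => hexUppercase.contains c) then some 8
  else if repr_string.toList.all (fun c => stringHexdigits.contains c) then some 16
  else if repr_string.toList.all (fun c => asciiLowercase.contains c) then some 32
  else if repr_string.toList.all (fun c => asciiUppercase.contains c) then some 64
  else if repr_string.toList.all (fun c => (asciiLowercase ++ asciiUppercase).contains c) then some 128
  else if repr_string.toList.all (fun c => (asciiLowercase ++ stringDigits).contains c) then some 256
  else if repr_string.toList.all (fun c => (asciiUppercase ++ stringDigits).contains c) then some 512
  else if repr_string.toList.all (fun c => (asciiLowercase ++ asciiUppercase ++ stringDigits).contains c) then some 1024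
  else if repr_string.toList.all (fun c => (asciiLowercase ++ asciiUppercase ++ stringDigits ++ ['_']).contains c) then some 2048
  else some 4096

-- ===== PORT B =====
-- _category: one bit per character category
def catOf (c : Char) : Nat :=
  if '0' ≤ c ∧ c ≤ '9' then 1           -- digit
  else if 'a' ≤ c ∧ c ≤ 'f' then 2      -- lower hex letter
  else if 'A' ≤ c ∧ c ≤ 'F' then 4      -- upper hex letter
  else if 'g' ≤ c ∧ c ≤ 'z' then 8      -- other lowercase
  else if 'G' ≤ c ∧ c ≤ 'Z' then 16     -- other uppercase
  else if c = '_' then 32               -- underscore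
  else if PySem.Chars.isspace c then 64 -- whitespace
  else 128                              -- anything else

-- _RULES: (allowed category mask, resulting class value) in the original priority order
def rulesB : List (Nat × Int) :=
  [(64, 1), (1, 2), (3, 4), (5, 8), (7, 16), (10, 32), (20, 64), (30, 128),
   (11, 256), (21, 512), (31, 1024), (63, 2048)]

-- the rule loop of B: first rule whose allowed mask covers the category mask, else GENERAL
def applyRules : List (Nat × Int) → Nat → Int
  | [], _ => 4096
  | (allowed, cls) :: rs, mask => if mask ||| allowed == allowed then cls else applyRules rs mask

def define_type_alt (repr_string : String) : Option Int :=
  if repr_string.toList.isEmpty then none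
  else some (applyRules rulesB (repr_string.toList.foldl (fun m c => m ||| catOf c) 0))

-- ===== PRECONDITION & SPEC =====
def Spec_define_type (repr_string : String) (out : Option Int) : Prop := out = define_type_alt repr_string
instance (repr_string : String) (out : Option Int) : Decidable (Spec_define_type repr_string out) := by unfold Spec_define_type; infer_instance

-- ===== CLAIM (what is proved, stated in full; the proofs are below) =====
def Claim_equal_define_type : Prop := ∀ (repr_string : String), Dom_define_type repr_string → Spec_define_type repr_string (define_type repr_string)

-- ===== LEMMAS AND PROOFS =====

lemma char_le_iff (a b : Char) : a ≤ b ↔ a.toNat ≤ b.toNat := by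
  simp [Char.le_def, UInt32.le_iff_toNat_le]

lemma char_eq_iff (a b : Char) : a = b ↔ a.toNat = b.toNat :=
  ⟨fun h => h ▸ rfl, fun h => Char.ext (UInt32.toNat_inj.mp h)⟩

-- code points of the character literals appearing in the ports
lemma ceq_d0 (c : Char) : (c = '0') = (c.toNat = 48) := by rw [char_eq_iff]; rfl
lemma ceq_d1 (c : Char) : (c = '1') = (c.toNat = 49) := by rw [char_eq_iff]; rfl
lemma ceq_d2 (c : Char) : (c = '2') = (c.toNat = 50) := by rw [char_eq_iff]; rfl
lemma ceq_d3 (c : Char) : (c = '3') = (c.toNat = 51) := by rw [char_eq_iff]; rfl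
lemma ceq_d4 (c : Char) : (c = '4') = (c.toNat = 52) := by rw [char_eq_iff]; rfl
lemma ceq_d5 (c : Char) : (c = '5') = (c.toNat = 53) := by rw [char_eq_iff]; rfl
lemma ceq_d6 (c : Char) : (c = '6') = (c.toNat = 54) := by rw [char_eq_iff]; rfl
lemma ceq_d7 (c : Char) : (c = '7') = (c.toNat = 55) := by rw [char_eq_iff]; rfl
lemma ceq_d8 (c : Char) : (c = '8') = (c.toNat = 56) := by rw [char_eq_iff]; rfl
lemma ceq_d9 (c : Char) : (c = '9') = (c.toNat = 57) := by rw [char_eq_iff]; rfl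
lemma ceq_La (c : Char) : (c = 'a') = (c.toNat = 97) := by rw [char_eq_iff]; rfl
lemma ceq_Lb (c : Char) : (c = 'b') = (c.toNat = 98) := by rw [char_eq_iff]; rfl
lemma ceq_Lc (c : Char) : (c = 'c') = (c.toNat = 99) := by rw [char_eq_iff]; rfl
lemma ceq_Ld (c : Char) : (c = 'd') = (c.toNat = 100) := by rw [char_eq_iff]; rfl
lemma ceq_Le (c : Char) : (c = 'e') = (c.toNat = 101) := by rw [char_eq_iff]; rfl
lemma ceq_Lf (c : Char) : (c = 'f') = (c.toNat = 102) := by rw [char_eq_iff]; rfl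
lemma ceq_Lg (c : Char) : (c = 'g') = (c.toNat = 103) := by rw [char_eq_iff]; rfl
lemma ceq_Lh (c : Char) : (c = 'h') = (c.toNat = 104) := by rw [char_eq_iff]; rfl
lemma ceq_Li (c : Char) : (c = 'i') = (c.toNat = 105) := by rw [char_eq_iff]; rfl
lemma ceq_Lj (c : Char) : (c = 'j') = (c.toNat = 106) := by rw [char_eq_iff]; rfl
lemma ceq_Lk (c : Char) : (c = 'k') = (c.toNat = 107) := by rw [char_eq_iff]; rfl
lemma ceq_Ll (c : Char) : (c = 'l') = (c.toNat = 108) := by rw [char_eq_iff]; rfl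
lemma ceq_Lm (c : Char) : (c = 'm') = (c.toNat = 109) := by rw [char_eq_iff]; rfl
lemma ceq_Ln (c : Char) : (c = 'n') = (c.toNat = 110) := by rw [char_eq_iff]; rfl
lemma ceq_Lo (c : Char) : (c = 'o') = (c.toNat = 111) := by rw [char_eq_iff]; rfl
lemma ceq_Lp (c : Char) : (c = 'p') = (c.toNat = 112) := by rw [char_eq_iff]; rfl
lemma ceq_Lq (c : Char) : (c = 'q') = (c.toNat = 113) := by rw [char_eq_iff]; rfl
lemma ceq_Lr (c : Char) : (c = 'r') = (c.toNat = 114) := by rw [char_eq_iff]; rfl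
lemma ceq_Ls (c : Char) : (c = 's') = (c.toNat = 115) := by rw [char_eq_iff]; rfl
lemma ceq_Lt (c : Char) : (c = 't') = (c.toNat = 116) := by rw [char_eq_iff]; rfl
lemma ceq_Lu (c : Char) : (c = 'u') = (c.toNat = 117) := by rw [char_eq_iff]; rfl
lemma ceq_Lv (c : Char) : (c = 'v') = (c.toNat = 118) := by rw [char_eq_iff]; rfl
lemma ceq_Lw (c : Char) : (c = 'w') = (c.toNat = 119) := by rw [char_eq_iff]; rfl
lemma ceq_Lx (c : Char) : (c = 'x') = (c.toNat = 120) := by rw [char_eq_iff]; rfl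
lemma ceq_Ly (c : Char) : (c = 'y') = (c.toNat = 121) := by rw [char_eq_iff]; rfl
lemma ceq_Lz (c : Char) : (c = 'z') = (c.toNat = 122) := by rw [char_eq_iff]; rfl
lemma ceq_UA (c : Char) : (c = 'A') = (c.toNat = 65) := by rw [char_eq_iff]; rfl
lemma ceq_UB (c : Char) : (c = 'B') = (c.toNat = 66) := by rw [char_eq_iff]; rfl
lemma ceq_UC (c : Char) : (c = 'C') = (c.toNat = 67) := by rw [char_eq_iff]; rfl
lemma ceq_UD (c : Char) : (c = 'D') = (c.toNat = 68) := by rw [char_eq_iff]; rfl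
lemma ceq_UE (c : Char) : (c = 'E') = (c.toNat = 69) := by rw [char_eq_iff]; rfl
lemma ceq_UF (c : Char) : (c = 'F') = (c.toNat = 70) := by rw [char_eq_iff]; rfl
lemma ceq_UG (c : Char) : (c = 'G') = (c.toNat = 71) := by rw [char_eq_iff]; rfl
lemma ceq_UH (c : Char) : (c = 'H') = (c.toNat = 72) := by rw [char_eq_iff]; rfl
lemma ceq_UI (c : Char) : (c = 'I') = (c.toNat = 73) := by rw [char_eq_iff]; rfl
lemma ceq_UJ (c : Char) : (c = 'J') = (c.toNat = 74) := by rw [char_eq_iff]; rfl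
lemma ceq_UK (c : Char) : (c = 'K') = (c.toNat = 75) := by rw [char_eq_iff]; rfl
lemma ceq_UL (c : Char) : (c = 'L') = (c.toNat = 76) := by rw [char_eq_iff]; rfl
lemma ceq_UM (c : Char) : (c = 'M') = (c.toNat = 77) := by rw [char_eq_iff]; rfl
lemma ceq_UN (c : Char) : (c = 'N') = (c.toNat = 78) := by rw [char_eq_iff]; rfl
lemma ceq_UO (c : Char) : (c = 'O') = (c.toNat = 79) := by rw [char_eq_iff]; rfl
lemma ceq_UP (c : Char) : (c = 'P') = (c.toNat = 80) := by rw [char_eq_iff]; rfl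
lemma ceq_UQ (c : Char) : (c = 'Q') = (c.toNat = 81) := by rw [char_eq_iff]; rfl
lemma ceq_UR (c : Char) : (c = 'R') = (c.toNat = 82) := by rw [char_eq_iff]; rfl
lemma ceq_US (c : Char) : (c = 'S') = (c.toNat = 83) := by rw [char_eq_iff]; rfl
lemma ceq_UT (c : Char) : (c = 'T') = (c.toNat = 84) := by rw [char_eq_iff]; rfl
lemma ceq_UU (c : Char) : (c = 'U') = (c.toNat = 85) := by rw [char_eq_iff]; rfl
lemma ceq_UV (c : Char) : (c = 'V') = (c.toNat = 86) := by rw [char_eq_iff]; rfl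
lemma ceq_UW (c : Char) : (c = 'W') = (c.toNat = 87) := by rw [char_eq_iff]; rfl
lemma ceq_UX (c : Char) : (c = 'X') = (c.toNat = 88) := by rw [char_eq_iff]; rfl
lemma ceq_UY (c : Char) : (c = 'Y') = (c.toNat = 89) := by rw [char_eq_iff]; rfl
lemma ceq_UZ (c : Char) : (c = 'Z') = (c.toNat = 90) := by rw [char_eq_iff]; rfl
lemma ceq_us (c : Char) : (c = '_') = (c.toNat = 95) := by rw [char_eq_iff]; rfl

-- the category mask of a whole string (B's fold, named for the proofs)
def maskOf (l : List Char) : Nat := l.foldl (fun m c => m ||| catOf c) 0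

-- catOf expressed purely on the code point
def catN (n : Nat) : Nat :=
  if 48 ≤ n ∧ n ≤ 57 then 1
  else if 97 ≤ n ∧ n ≤ 102 then 2
  else if 65 ≤ n ∧ n ≤ 70 then 4
  else if 103 ≤ n ∧ n ≤ 122 then 8
  else if 71 ≤ n ∧ n ≤ 90 then 16
  else if n = 95 then 32
  else if n = 32 ∨ (9 ≤ n ∧ n ≤ 13) ∨ (28 ≤ n ∧ n ≤ 31) ∨ n = 133 ∨ n = 160 ∨ n = 5760 ∨
          (8192 ≤ n ∧ n ≤ 8202) ∨ n = 8232 ∨ n = 8233 ∨ n = 8239 ∨ n = 8287 ∨ n = 12288 then 64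
  else 128

lemma isspace_toNat (c : Char) :
    PySem.Chars.isspace c = true ↔
      (c.toNat = 32 ∨ (9 ≤ c.toNat ∧ c.toNat ≤ 13) ∨ (28 ≤ c.toNat ∧ c.toNat ≤ 31) ∨
       c.toNat = 133 ∨ c.toNat = 160 ∨ c.toNat = 5760 ∨ (8192 ≤ c.toNat ∧ c.toNat ≤ 8202) ∨
       c.toNat = 8232 ∨ c.toNat = 8233 ∨ c.toNat = 8239 ∨ c.toNat = 8287 ∨ c.toNat = 12288) := by
  simp [PySem.Chars.isspace]
  tauto

lemma isdigit_toNat (c : Char) :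
    PySem.Chars.isdigit c = true ↔ (48 ≤ c.toNat ∧ c.toNat ≤ 57) := by
  simp [PySem.Chars.isdigit, Char.le_def, UInt32.le_iff_toNat_le]

lemma catOf_eq_catN (c : Char) : catOf c = catN c.toNat := by
  have h0 : ('0' : Char).toNat = 48 := rfl
  have h9 : ('9' : Char).toNat = 57 := rfl
  have ha : ('a' : Char).toNat = 97 := rfl
  have hf : ('f' : Char).toNat = 102 := rfl
  have hA : ('A' : Char).toNat = 65 := rfl
  have hF : ('F' : Char).toNat = 70 := rfl
  have hg : ('g' : Char).toNat = 103 := rfl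
  have hz : ('z' : Char).toNat = 122 := rfl
  have hG : ('G' : Char).toNat = 71 := rfl
  have hZ : ('Z' : Char).toNat = 90 := rfl
  simp only [catOf, catN, char_le_iff, ceq_us, isspace_toNat, h0, h9, ha, hf, hA, hF, hg, hz, hG, hZ]

-- bit arithmetic: an OR is below a mask iff both arguments are
lemma or_eq_iff_testBit (x y : Nat) :
    x ||| y = y ↔ ∀ i, (x.testBit i || y.testBit i) = y.testBit i := by
  constructor
  · intro h i; rw [← Nat.testBit_or, h]
  · intro h; apply Nat.eq_of_testBit_eq; intro i; rw [Nat.testBit_or]; exact h i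

lemma or_or_subset (a b M : Nat) : ((a ||| b) ||| M = M) ↔ (a ||| M = M ∧ b ||| M = M) := by
  have bool3 : ∀ x y m : Bool, (((x || y) || m) = m) ↔ ((x || m) = m ∧ (y || m) = m) := by decide
  simp only [or_eq_iff_testBit, Nat.testBit_or]
  constructor
  · intro h
    exact ⟨fun i => ((bool3 _ _ _).mp (h i)).1, fun i => ((bool3 _ _ _).mp (h i)).2⟩
  · rintro ⟨h1, h2⟩ i
    exact (bool3 _ _ _).mpr ⟨h1 i, h2 i⟩

lemma foldl_or_shift (l : List Char) (m : Nat) :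
    l.foldl (fun a c => a ||| catOf c) m = m ||| maskOf l := by
  induction l generalizing m with
  | nil => simp [maskOf]
  | cons c t ih =>
    show List.foldl _ (m ||| catOf c) t = m ||| List.foldl _ (0 ||| catOf c) t
    rw [ih, ih, Nat.zero_or, Nat.or_assoc]

lemma mask_subset (l : List Char) (M : Nat) :
    maskOf l ||| M = M ↔ ∀ c ∈ l, catOf c ||| M = M := by
  induction l with
  | nil => simp [maskOf]
  | cons c t ih =>
    have hm : maskOf (c :: t) = catOf c ||| maskOf t := by
      show List.foldl _ (0 ||| catOf c) t = _
      rw [foldl_or_shift, Nat.zero_or]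
    rw [hm, or_or_subset, List.forall_mem_cons, ih]

-- per-code-point characterisation of each rule's subset test

lemma catN_64 (n : Nat) : catN n ||| 64 = 64 ↔ (n = 32 ∨ (9 ≤ n ∧ n ≤ 13) ∨ (28 ≤ n ∧ n ≤ 31) ∨ n = 133 ∨ n = 160 ∨ n = 5760 ∨ (8192 ≤ n ∧ n ≤ 8202) ∨ n = 8232 ∨ n = 8233 ∨ n = 8239 ∨ n = 8287 ∨ n = 12288) := by
  unfold catN
  split_ifs <;> first
    | exact iff_of_true (by decide) (by omega)
    | exact iff_of_false (by decide) (by omega)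

lemma catN_1 (n : Nat) : catN n ||| 1 = 1 ↔ (48 ≤ n ∧ n ≤ 57) := by
  unfold catN
  split_ifs <;> first
    | exact iff_of_true (by decide) (by omega)
    | exact iff_of_false (by decide) (by omega)

lemma catN_3 (n : Nat) : catN n ||| 3 = 3 ↔ ((48 ≤ n ∧ n ≤ 57) ∨ (97 ≤ n ∧ n ≤ 102)) := by
  unfold catN
  split_ifs <;> first
    | exact iff_of_true (by decide) (by omega)
    | exact iff_of_false (by decide) (by omega)

lemma catN_5 (n : Nat) : catN n ||| 5 = 5 ↔ ((48 ≤ n ∧ n ≤ 57) ∨ (65 ≤ n ∧ n ≤ 70)) := by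
  unfold catN
  split_ifs <;> first
    | exact iff_of_true (by decide) (by omega)
    | exact iff_of_false (by decide) (by omega)

lemma catN_7 (n : Nat) : catN n ||| 7 = 7 ↔ ((48 ≤ n ∧ n ≤ 57) ∨ (97 ≤ n ∧ n ≤ 102) ∨ (65 ≤ n ∧ n ≤ 70)) := by
  unfold catN
  split_ifs <;> first
    | exact iff_of_true (by decide) (by omega)
    | exact iff_of_false (by decide) (by omega)

lemma catN_10 (n : Nat) : catN n ||| 10 = 10 ↔ (97 ≤ n ∧ n ≤ 122) := by
  unfold catN
  split_ifs <;> first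
    | exact iff_of_true (by decide) (by omega)
    | exact iff_of_false (by decide) (by omega)

lemma catN_20 (n : Nat) : catN n ||| 20 = 20 ↔ (65 ≤ n ∧ n ≤ 90) := by
  unfold catN
  split_ifs <;> first
    | exact iff_of_true (by decide) (by omega)
    | exact iff_of_false (by decide) (by omega)

lemma catN_30 (n : Nat) : catN n ||| 30 = 30 ↔ ((97 ≤ n ∧ n ≤ 122) ∨ (65 ≤ n ∧ n ≤ 90)) := by
  unfold catN
  split_ifs <;> first
    | exact iff_of_true (by decide) (by omega)
    | exact iff_of_false (by decide) (by omega)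

lemma catN_11 (n : Nat) : catN n ||| 11 = 11 ↔ ((97 ≤ n ∧ n ≤ 122) ∨ (48 ≤ n ∧ n ≤ 57)) := by
  unfold catN
  split_ifs <;> first
    | exact iff_of_true (by decide) (by omega)
    | exact iff_of_false (by decide) (by omega)

lemma catN_21 (n : Nat) : catN n ||| 21 = 21 ↔ ((65 ≤ n ∧ n ≤ 90) ∨ (48 ≤ n ∧ n ≤ 57)) := by
  unfold catN
  split_ifs <;> first
    | exact iff_of_true (by decide) (by omega)
    | exact iff_of_false (by decide) (by omega)

lemma catN_31 (n : Nat) : catN n ||| 31 = 31 ↔ ((97 ≤ n ∧ n ≤ 122) ∨ (65 ≤ n ∧ n ≤ 90) ∨ (48 ≤ n ∧ n ≤ 57)) := by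
  unfold catN
  split_ifs <;> first
    | exact iff_of_true (by decide) (by omega)
    | exact iff_of_false (by decide) (by omega)

lemma catN_63 (n : Nat) : catN n ||| 63 = 63 ↔ ((97 ≤ n ∧ n ≤ 122) ∨ (65 ≤ n ∧ n ≤ 90) ∨ (48 ≤ n ∧ n ≤ 57) ∨ n = 95) := by
  unfold catN
  split_ifs <;> first
    | exact iff_of_true (by decide) (by omega)
    | exact iff_of_false (by decide) (by omega)

-- membership in A's character lists, characterised on code points

lemma mem_hexLowercase (c : Char) : hexLowercase.contains c = true ↔ ((48 ≤ c.toNat ∧ c.toNat ≤ 57) ∨ (97 ≤ c.toNat ∧ c.toNat ≤ 102)) := by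
  simp only [hexLowercase, List.contains_eq_mem, List.mem_cons, List.not_mem_nil,
    or_false, decide_eq_true_eq, ceq_d0, ceq_d1, ceq_d2, ceq_d3, ceq_d4, ceq_d5, ceq_d6, ceq_d7, ceq_d8, ceq_d9, ceq_La, ceq_Lb, ceq_Lc, ceq_Ld, ceq_Le, ceq_Lf]
  constructor <;> (intro h; omega)

lemma mem_hexUppercase (c : Char) : hexUppercase.contains c = true ↔ ((48 ≤ c.toNat ∧ c.toNat ≤ 57) ∨ (65 ≤ c.toNat ∧ c.toNat ≤ 70)) := by
  simp only [hexUppercase, List.contains_eq_mem, List.mem_cons, List.not_mem_nil,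
    or_false, decide_eq_true_eq, ceq_d0, ceq_d1, ceq_d2, ceq_d3, ceq_d4, ceq_d5, ceq_d6, ceq_d7, ceq_d8, ceq_d9, ceq_UA, ceq_UB, ceq_UC, ceq_UD, ceq_UE, ceq_UF]
  constructor <;> (intro h; omega)

lemma mem_hexdigits (c : Char) : stringHexdigits.contains c = true ↔ ((48 ≤ c.toNat ∧ c.toNat ≤ 57) ∨ (97 ≤ c.toNat ∧ c.toNat ≤ 102) ∨ (65 ≤ c.toNat ∧ c.toNat ≤ 70)) := by
  simp only [stringHexdigits, stringDigits, List.contains_eq_mem, List.mem_append, List.mem_cons, List.not_mem_nil,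
    or_false, decide_eq_true_eq, ceq_d0, ceq_d1, ceq_d2, ceq_d3, ceq_d4, ceq_d5, ceq_d6, ceq_d7, ceq_d8, ceq_d9, ceq_La, ceq_Lb, ceq_Lc, ceq_Ld, ceq_Le, ceq_Lf, ceq_UA, ceq_UB, ceq_UC, ceq_UD, ceq_UE, ceq_UF]
  constructor <;> (intro h; omega)

lemma mem_lower (c : Char) : asciiLowercase.contains c = true ↔ (97 ≤ c.toNat ∧ c.toNat ≤ 122) := by
  simp only [asciiLowercase, List.contains_eq_mem, List.mem_cons, List.not_mem_nil,
    or_false, decide_eq_true_eq, ceq_La, ceq_Lb, ceq_Lc, ceq_Ld, ceq_Le, ceq_Lf, ceq_Lg, ceq_Lh, ceq_Li, ceq_Lj, ceq_Lk, ceq_Ll, ceq_Lm, ceq_Ln, ceq_Lo, ceq_Lp, ceq_Lq, ceq_Lr, ceq_Ls, ceq_Lt, ceq_Lu, ceq_Lv, ceq_Lw, ceq_Lx, ceq_Ly, ceq_Lz]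
  constructor <;> (intro h; omega)

lemma mem_upper (c : Char) : asciiUppercase.contains c = true ↔ (65 ≤ c.toNat ∧ c.toNat ≤ 90) := by
  simp only [asciiUppercase, List.contains_eq_mem, List.mem_cons, List.not_mem_nil,
    or_false, decide_eq_true_eq, ceq_UA, ceq_UB, ceq_UC, ceq_UD, ceq_UE, ceq_UF, ceq_UG, ceq_UH, ceq_UI, ceq_UJ, ceq_UK, ceq_UL, ceq_UM, ceq_UN, ceq_UO, ceq_UP, ceq_UQ, ceq_UR, ceq_US, ceq_UT, ceq_UU, ceq_UV, ceq_UW, ceq_UX, ceq_UY, ceq_UZ]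
  constructor <;> (intro h; omega)

lemma mem_lower_upper (c : Char) : (asciiLowercase ++ asciiUppercase).contains c = true ↔ ((97 ≤ c.toNat ∧ c.toNat ≤ 122) ∨ (65 ≤ c.toNat ∧ c.toNat ≤ 90)) := by
  simp only [asciiLowercase, asciiUppercase, List.contains_eq_mem, List.mem_append, List.mem_cons, List.not_mem_nil,
    or_false, decide_eq_true_eq, ceq_La, ceq_Lb, ceq_Lc, ceq_Ld, ceq_Le, ceq_Lf, ceq_Lg, ceq_Lh, ceq_Li, ceq_Lj, ceq_Lk, ceq_Ll, ceq_Lm, ceq_Ln, ceq_Lo, ceq_Lp, ceq_Lq, ceq_Lr, ceq_Ls, ceq_Lt, ceq_Lu, ceq_Lv, ceq_Lw, ceq_Lx, ceq_Ly, ceq_Lz, ceq_UA, ceq_UB, ceq_UC, ceq_UD, ceq_UE, ceq_UF, ceq_UG, ceq_UH, ceq_UI, ceq_UJ, ceq_UK, ceq_UL, ceq_UM, ceq_UN, ceq_UO, ceq_UP, ceq_UQ, ceq_UR, ceq_US, ceq_UT, ceq_UU, ceq_UV, ceq_UW, ceq_UX, ceq_UY, ceq_UZ]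
  constructor <;> (intro h; omega)

lemma mem_lower_digits (c : Char) : (asciiLowercase ++ stringDigits).contains c = true ↔ ((97 ≤ c.toNat ∧ c.toNat ≤ 122) ∨ (48 ≤ c.toNat ∧ c.toNat ≤ 57)) := by
  simp only [asciiLowercase, stringDigits, List.contains_eq_mem, List.mem_append, List.mem_cons, List.not_mem_nil,
    or_false, decide_eq_true_eq, ceq_La, ceq_Lb, ceq_Lc, ceq_Ld, ceq_Le, ceq_Lf, ceq_Lg, ceq_Lh, ceq_Li, ceq_Lj, ceq_Lk, ceq_Ll, ceq_Lm, ceq_Ln, ceq_Lo, ceq_Lp, ceq_Lq, ceq_Lr, ceq_Ls, ceq_Lt, ceq_Lu, ceq_Lv, ceq_Lw, ceq_Lx, ceq_Ly, ceq_Lz, ceq_d0, ceq_d1, ceq_d2, ceq_d3, ceq_d4, ceq_d5, ceq_d6, ceq_d7, ceq_d8, ceq_d9]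
  constructor <;> (intro h; omega)

lemma mem_upper_digits (c : Char) : (asciiUppercase ++ stringDigits).contains c = true ↔ ((65 ≤ c.toNat ∧ c.toNat ≤ 90) ∨ (48 ≤ c.toNat ∧ c.toNat ≤ 57)) := by
  simp only [asciiUppercase, stringDigits, List.contains_eq_mem, List.mem_append, List.mem_cons, List.not_mem_nil,
    or_false, decide_eq_true_eq, ceq_UA, ceq_UB, ceq_UC, ceq_UD, ceq_UE, ceq_UF, ceq_UG, ceq_UH, ceq_UI, ceq_UJ, ceq_UK, ceq_UL, ceq_UM, ceq_UN, ceq_UO, ceq_UP, ceq_UQ, ceq_UR, ceq_US, ceq_UT, ceq_UU, ceq_UV, ceq_UW, ceq_UX, ceq_UY, ceq_UZ, ceq_d0, ceq_d1, ceq_d2, ceq_d3, ceq_d4, ceq_d5, ceq_d6, ceq_d7, ceq_d8, ceq_d9]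
  constructor <;> (intro h; omega)

lemma mem_letters_digits (c : Char) : (asciiLowercase ++ asciiUppercase ++ stringDigits).contains c = true ↔ ((97 ≤ c.toNat ∧ c.toNat ≤ 122) ∨ (65 ≤ c.toNat ∧ c.toNat ≤ 90) ∨ (48 ≤ c.toNat ∧ c.toNat ≤ 57)) := by
  simp only [asciiLowercase, asciiUppercase, stringDigits, List.contains_eq_mem, List.mem_append, List.mem_cons, List.not_mem_nil,
    or_false, decide_eq_true_eq, ceq_La, ceq_Lb, ceq_Lc, ceq_Ld, ceq_Le, ceq_Lf, ceq_Lg, ceq_Lh, ceq_Li, ceq_Lj, ceq_Lk, ceq_Ll, ceq_Lm, ceq_Ln, ceq_Lo, ceq_Lp, ceq_Lq, ceq_Lr, ceq_Ls, ceq_Lt, ceq_Lu, ceq_Lv, ceq_Lw, ceq_Lx, ceq_Ly, ceq_Lz, ceq_UA, ceq_UB, ceq_UC, ceq_UD, ceq_UE, ceq_UF, ceq_UG, ceq_UH, ceq_UI, ceq_UJ, ceq_UK, ceq_UL, ceq_UM, ceq_UN, ceq_UO, ceq_UP, ceq_UQ, ceq_UR, ceq_US, ceq_UT, ceq_UU,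 ceq_UV, ceq_UW, ceq_UX, ceq_UY, ceq_UZ, ceq_d0, ceq_d1, ceq_d2, ceq_d3, ceq_d4, ceq_d5, ceq_d6, ceq_d7, ceq_d8, ceq_d9]
  constructor <;> (intro h; omega)

lemma mem_word (c : Char) : (asciiLowercase ++ asciiUppercase ++ stringDigits ++ ['_']).contains c = true ↔ ((97 ≤ c.toNat ∧ c.toNat ≤ 122) ∨ (65 ≤ c.toNat ∧ c.toNat ≤ 90) ∨ (48 ≤ c.toNat ∧ c.toNat ≤ 57) ∨ c.toNat = 95) := by
  simp only [asciiLowercase, asciiUppercase, stringDigits, List.contains_eq_mem, List.mem_append, List.mem_cons, List.not_mem_nil,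
    or_false, decide_eq_true_eq, ceq_La, ceq_Lb, ceq_Lc, ceq_Ld, ceq_Le, ceq_Lf, ceq_Lg, ceq_Lh, ceq_Li, ceq_Lj, ceq_Lk, ceq_Ll, ceq_Lm, ceq_Ln, ceq_Lo, ceq_Lp, ceq_Lq, ceq_Lr, ceq_Ls, ceq_Lt, ceq_Lu, ceq_Lv, ceq_Lw, ceq_Lx, ceq_Ly, ceq_Lz, ceq_UA, ceq_UB, ceq_UC, ceq_UD, ceq_UE, ceq_UF, ceq_UG, ceq_UH, ceq_UI, ceq_UJ, ceq_UK, ceq_UL, ceq_UM, ceq_UN, ceq_UO, ceq_UP, ceq_UQ, ceq_UR, ceq_US, ceq_UT, ceq_UU, ceq_UV, ceq_UW, ceq_UX, ceq_UY, ceq_UZ, ceq_d0, ceq_d1, ceq_d2, ceq_d3, ceq_d4, ceq_d5, ceq_d6, ceq_d7, ceq_d8, ceq_d9, ceq_us]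
  constructor <;> (intro h; omega)

-- each of B's whole-string subset tests equals the corresponding scan of A
lemma condAll (l : List Char) (M : Nat) (p : Char → Bool)
    (hpc : ∀ c, catN c.toNat ||| M = M ↔ p c = true) :
    (maskOf l ||| M == M) = l.all p := by
  rw [Bool.eq_iff_iff, beq_iff_eq, List.all_eq_true, mask_subset]
  constructor
  · intro h c hc; exact (hpc c).mp (by rw [← catOf_eq_catN]; exact h c hc)
  · intro h c hc; rw [catOf_eq_catN]; exact (hpc c).mpr (h c hc)

theorem define_type_eq (s : String) : define_type s = define_type_alt s := by
  unfold define_type define_type_alt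
  rw [show (PySem.Str.len s == 0) = s.toList.isEmpty by
    rw [Bool.eq_iff_iff, beq_iff_eq]; simp [pysem, List.isEmpty_iff]]
  by_cases hnil : s.toList.isEmpty = true
  · rw [if_pos hnil, if_pos hnil]
  · have hF : s.toList.isEmpty = false := by
      cases h' : s.toList.isEmpty
      · rfl
      · exact absurd h' hnil
    rw [if_neg hnil, if_neg hnil]
    rw [show List.foldl (fun m c => m ||| catOf c) 0 s.toList = maskOf s.toList from rfl]
    have hsp : (maskOf s.toList ||| 64 == 64) = PySem.Str.strIsspace s := by
      rw [PySem.Str.strIsspace_eq,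
        condAll s.toList 64 PySem.Chars.isspace (fun c => by rw [catN_64, isspace_toNat])]
      simp [PySem.Chars.strIsspace, hF]
    have hdg : (maskOf s.toList ||| 1 == 1) = PySem.Str.strIsdigit s := by
      rw [PySem.Str.strIsdigit_eq,
        condAll s.toList 1 PySem.Chars.isdigit (fun c => by rw [catN_1, isdigit_toNat])]
      simp [PySem.Chars.strIsdigit, hF]
    have h3 := condAll s.toList 3 (fun c => hexLowercase.contains c)
      (fun c => by rw [catN_3, mem_hexLowercase])
    have h5 := condAll s.toList 5 (fun c => hexUppercase.contains c)
      (fun c => by rw [catN_5, mem_hexUppercase])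
    have h7 := condAll s.toList 7 (fun c => stringHexdigits.contains c)
      (fun c => by rw [catN_7, mem_hexdigits])
    have h10 := condAll s.toList 10 (fun c => asciiLowercase.contains c)
      (fun c => by rw [catN_10, mem_lower])
    have h20 := condAll s.toList 20 (fun c => asciiUppercase.contains c)
      (fun c => by rw [catN_20, mem_upper])
    have h30 := condAll s.toList 30 (fun c => (asciiLowercase ++ asciiUppercase).contains c)
      (fun c => by rw [catN_30, mem_lower_upper])
    have h11 := condAll s.toList 11 (fun c => (asciiLowercase ++ stringDigits).contains c)
      (fun c => by rw [catN_11, mem_lower_digits])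
    have h21 := condAll s.toList 21 (fun c => (asciiUppercase ++ stringDigits).contains c)
      (fun c => by rw [catN_21, mem_upper_digits])
    have h31 := condAll s.toList 31
      (fun c => (asciiLowercase ++ asciiUppercase ++ stringDigits).contains c)
      (fun c => by rw [catN_31, mem_letters_digits])
    have h63 := condAll s.toList 63
      (fun c => (asciiLowercase ++ asciiUppercase ++ stringDigits ++ ['_']).contains c)
      (fun c => by rw [catN_63, mem_word])
    simp only [rulesB, applyRules, apply_ite (some : Int → Option Int),
      hsp, hdg, h3, h5, h7, h10, h20, h30, h11, h21, h31, h63]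

-- ===== VERDICT (by name: the statement is the Claim_ definition above) =====
theorem define_type_spec : Claim_equal_define_type := by
  intro repr_string _
  unfold Spec_define_type
  exact define_type_eq repr_string
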